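-- pv_equiv track=rewrite | github.com/subramanyapuneeth530/Qtool---quantum-arithmetic-tool | qtool/ops/karatsuba_gf2_multiplier.py | _carryless_mul_expected
-- ===== SOURCE A (Python) =====
-- def _carryless_mul_expected(A: int, B: int, n: int) -> int:
--     """Schoolbook carryless (GF(2)) product for checking expected output."""
--     prod = 0
--     for i in range(n):
--         if (A >> i) & 1:
--             for j in range(n):
--                 if (B >> j) & 1:
--                     prod ^= (1 << (i + j))
--     return prod  # fits in 2n-1 bits
-- ===== SOURCE B (Python) =====
-- def _carryless_mul_expected(A: int, B: int, n: int) -> int: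
--     """GF(2) carryless product of the low n bits, one big-int XOR per set bit of A."""
--     if n <= 0:
--         return 0
--     mask = (1 << n) - 1
--     a = A & mask
--     b = B & mask
--     prod = 0
--     shift = 0
--     while a:
--         if a & 1:
--             prod ^= b << shift
--         a >>= 1
--         shift += 1
--     return prod
-- ===== Notes on version B (the rewrite author's own statement) =====
-- stated objective: faster
-- what changed: Replaces the n*n double loop over bit pairs (one 1-bit XOR each) with masking both operands to n bits once and then a single pass over the set bits of A, XOR-ing the whole shifted B per set bit.
import Mathlib
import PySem

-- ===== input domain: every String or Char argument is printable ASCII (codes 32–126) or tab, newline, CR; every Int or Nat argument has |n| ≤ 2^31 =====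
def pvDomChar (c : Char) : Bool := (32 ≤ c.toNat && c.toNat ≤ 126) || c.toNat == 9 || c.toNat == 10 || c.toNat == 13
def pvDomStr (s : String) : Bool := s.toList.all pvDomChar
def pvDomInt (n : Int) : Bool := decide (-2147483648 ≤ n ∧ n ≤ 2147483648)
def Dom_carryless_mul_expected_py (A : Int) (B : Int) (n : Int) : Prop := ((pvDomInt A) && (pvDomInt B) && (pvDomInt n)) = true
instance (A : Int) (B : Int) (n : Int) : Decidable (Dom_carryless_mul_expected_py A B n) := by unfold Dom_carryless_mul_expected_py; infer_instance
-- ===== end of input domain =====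

-- B replaces A's n×n double loop of single-bit XORs by masking once and XOR-ing a whole shifted B per set bit of A (faster, asymptotically fewer big-int ops).

-- ===== PORT A =====
-- literal port of the schoolbook double loop: for i in range(n): if (A>>i)&1: for j in range(n): if (B>>j)&1: prod ^= 1 << (i+j)
def carryless_mul_expected_py (A : Int) (B : Int) (n : Int) : Int :=
  (PySem.List.pyRange 0 n 1).foldl (fun prod i =>
    if PySem.Int.band (A >>> i.toNat) 1 ≠ 0 then
      (PySem.List.pyRange 0 n 1).foldl (fun prod2 j =>
        if PySem.Int.band (B >>> j.toNat) 1 ≠ 0 then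
          PySem.Int.bxor prod2 ((1 : Int) <<< (i + j).toNat)
        else prod2) prod
    else prod) 0

-- ===== PORT B =====
-- the while-loop of Source B: while a: if a&1: prod ^= b << shift; a >>= 1; shift += 1   (a is nonnegative after masking, carried as a Nat)
def cmeLoop (a : Nat) (b : Int) (shift : Nat) (prod : Int) : Int :=
  if a = 0 then prod
  else cmeLoop (a >>> 1) b (shift + 1)
    (if a &&& 1 ≠ 0 then PySem.Int.bxor prod (b <<< shift) else prod)
termination_by a
decreasing_by
  simp only [Nat.shiftRight_eq_div_pow, pow_one]
  exact Nat.div_lt_self (Nat.pos_of_ne_zero (by assumption)) one_lt_two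

def carryless_mul_expected_py_alt (A : Int) (B : Int) (n : Int) : Int :=
  if n ≤ 0 then 0
  else cmeLoop (PySem.Int.band A (((1 : Int) <<< n.toNat) - 1)).toNat
               (PySem.Int.band B (((1 : Int) <<< n.toNat) - 1)) 0 0

-- ===== PRECONDITION & SPEC =====
def Spec_carryless_mul_expected_py (A : Int) (B : Int) (n : Int) (out : Int) : Prop := out = carryless_mul_expected_py_alt A B n
instance (A : Int) (B : Int) (n : Int) (out : Int) : Decidable (Spec_carryless_mul_expected_py A B n out) := by unfold Spec_carryless_mul_expected_py; infer_instance

-- ===== CLAIM (what is proved, stated in full; the proofs are below) =====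
def Claim_equal_carryless_mul_expected_py : Prop := ∀ (A : Int) (B : Int) (n : Int), Dom_carryless_mul_expected_py A B n → Spec_carryless_mul_expected_py A B n (carryless_mul_expected_py A B n)

-- ===== LEMMAS AND PROOFS =====

-- carryless (GF(2)) product on Nat, recursing on the bits of `a`
def clmul (a b : Nat) : Nat :=
  if a = 0 then 0
  else (if a % 2 = 1 then b else 0) ^^^ 2 * clmul (a / 2) b
termination_by a
decreasing_by exact Nat.div_lt_self (Nat.pos_of_ne_zero (by assumption)) one_lt_two

lemma clmul_eq (a b : Nat) :
    clmul a b = if a = 0 then 0 else (if a % 2 = 1 then b else 0) ^^^ 2 * clmul (a / 2) b := by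
  rw [clmul]

lemma pow_mul_xor (s x y : Nat) : 2 ^ s * (x ^^^ y) = 2 ^ s * x ^^^ 2 ^ s * y := by
  have := @Nat.shiftLeft_xor_distrib s x y
  simpa [Nat.shiftLeft_eq, mul_comm] using this

lemma two_mul_xor (x y : Nat) : 2 * (x ^^^ y) = 2 * x ^^^ 2 * y := by
  have := pow_mul_xor 1 x y
  simpa using this

-- x and 2^k*m occupy disjoint bit ranges, so XOR is addition
lemma xor_two_pow_mul (x m k : Nat) (hx : x < 2 ^ k) : x ^^^ 2 ^ k * m = 2 ^ k * m + x := by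
  apply Nat.eq_of_testBit_eq
  intro j
  have h1 : ∀ j', (2 ^ k * m).testBit j' = if j' < k then false else m.testBit (j' - k) := by
    intro j'
    have := Nat.testBit_two_pow_mul_add m (b := 0) (i := k) (Nat.two_pow_pos k) j'
    simpa using this
  rw [Nat.testBit_xor, h1, Nat.testBit_two_pow_mul_add m hx j]
  by_cases hj : j < k
  · simp [hj]
  · simp [hj, Nat.testBit_lt_two_pow (lt_of_lt_of_le hx (Nat.pow_le_pow_right (by norm_num) (le_of_not_gt hj)))]

lemma clmul_zero_left (b : Nat) : clmul 0 b = 0 := by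
  rw [clmul_eq]; simp

lemma clmul_two_mul_right (a b : Nat) : clmul a (2 * b) = 2 * clmul a b := by
  induction a using Nat.strong_induction_on with
  | _ a ih =>
    rw [clmul_eq, clmul_eq a]
    by_cases h0 : a = 0
    · simp [h0]
    · have := ih (a / 2) (Nat.div_lt_self (Nat.pos_of_ne_zero h0) one_lt_two)
      simp only [h0, if_false, this]
      rw [two_mul_xor]
      by_cases hp : a % 2 = 1 <;> simp [hp]

lemma clmul_two_pow_right (a k : Nat) : clmul a (2 ^ k) = 2 ^ k * a := by
  induction a using Nat.strong_induction_on with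
  | _ a ih =>
    rw [clmul_eq]
    by_cases h0 : a = 0
    · simp [h0]
    · have ihh := ih (a / 2) (Nat.div_lt_self (Nat.pos_of_ne_zero h0) one_lt_two)
      simp only [h0, if_false, ihh]
      have hx : (if a % 2 = 1 then 2 ^ k else 0) < 2 ^ (k + 1) := by
        by_cases hp : a % 2 = 1 <;> simp [hp, pow_succ]
      have h21 : (2 : Nat) * (2 ^ k * (a / 2)) = 2 ^ (k + 1) * (a / 2) := by ring
      rw [h21, xor_two_pow_mul _ _ _ hx]
      by_cases hp : a % 2 = 1
      · rw [if_pos hp]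
        have ha' : a = 2 * (a / 2) + 1 := by omega
        conv_rhs => rw [ha']
        ring
      · rw [if_neg hp]
        have ha' : a = 2 * (a / 2) := by omega
        conv_rhs => rw [ha']
        ring

-- the common Nat-level fold: visit bit j of a for j < N, XOR-ing 2^j * v per set bit
def foldBits (N a v p : Nat) : Nat :=
  (List.range N).foldl (fun q j => if a.testBit j then q ^^^ 2 ^ j * v else q) p

lemma foldBits_eq_clmul (N : Nat) : ∀ a v p, a < 2 ^ N → foldBits N a v p = p ^^^ clmul a v := by
  induction N with
  | zero =>
    intro a v p ha
    interval_cases a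
    simp [foldBits, clmul_zero_left]
  | succ N ih =>
    intro a v p ha
    rw [foldBits, List.range_succ_eq_map, List.foldl_cons, List.foldl_map]
    have step : (List.range N).foldl
        (fun q j => if a.testBit j.succ then q ^^^ 2 ^ j.succ * v else q)
        (if a.testBit 0 then p ^^^ 2 ^ 0 * v else p)
        = foldBits N (a / 2) (2 * v) (if a.testBit 0 then p ^^^ 2 ^ 0 * v else p) := by
      rw [foldBits]
      apply List.foldl_ext
      intro q j _
      rw [Nat.succ_eq_add_one, Nat.testBit_add_one]
      congr 1
      rw [pow_succ]; ring
    rw [step, ih (a / 2) (2 * v) _ (by omega)]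
    rw [clmul_eq a, clmul_two_mul_right]
    by_cases h0 : a = 0
    · simp [h0, clmul_zero_left]
    · simp only [h0, if_false, Nat.testBit_zero]
      by_cases hp : a % 2 = 1
      · simp only [hp, decide_true, if_pos, pow_zero, one_mul, Nat.xor_assoc]
      · simp [hp]

-- B-side loop ≡ clmul
lemma cmeLoop_eq_def (a : Nat) (b : Int) (s : Nat) (p : Int) :
    cmeLoop a b s p = if a = 0 then p
      else cmeLoop (a >>> 1) b (s + 1)
        (if a &&& 1 ≠ 0 then PySem.Int.bxor p (b <<< s) else p) := by
  rw [cmeLoop]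

lemma cmeLoop_eq (a : Nat) : ∀ (b s p : Nat),
    cmeLoop a (↑b) s (↑p) = ↑(p ^^^ 2 ^ s * clmul a b) := by
  induction a using Nat.strong_induction_on with
  | _ a ih =>
    intro b s p
    rw [cmeLoop_eq_def]
    by_cases h0 : a = 0
    · simp [h0, clmul_zero_left]
    · have hdiv : a >>> 1 = a / 2 := by rw [Nat.shiftRight_eq_div_pow, pow_one]
      have hb : (↑b : Int) <<< s = ↑(2 ^ s * b) := by
        rw [← Int.natCast_shiftLeft, Nat.shiftLeft_eq]; norm_cast; ring
      have hone : a &&& 1 = a % 2 := Nat.and_one_is_mod a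
      simp only [h0, if_false, hdiv, hone]
      by_cases hp : a % 2 = 1
      · rw [if_pos (by omega), hb, PySem.Int.bxor_natCast,
          ih (a / 2) (Nat.div_lt_self (Nat.pos_of_ne_zero h0) one_lt_two)]
        congr 1
        rw [clmul_eq a, if_neg h0, if_pos hp, pow_mul_xor, ← Nat.xor_assoc]
        congr 1
        rw [pow_succ]; ring
      · rw [if_neg (by omega),
          ih (a / 2) (Nat.div_lt_self (Nat.pos_of_ne_zero h0) one_lt_two)]
        congr 1
        rw [clmul_eq a, if_neg h0, if_neg hp, Nat.zero_xor]
        rw [pow_succ]; ring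

lemma one_shl (N : Nat) : ((1 : Int) <<< N) = ↑(2 ^ N : Nat) := by
  have h := Int.natCast_shiftLeft 1 N
  rw [Nat.shiftLeft_eq, one_mul] at h
  exact_mod_cast h.symm

-- masking: Python X & ((1 << N) - 1) is X mod 2^N
lemma band_mask (X : Int) (N : Nat) :
    PySem.Int.band X (((1 : Int) <<< N) - 1) = X % (2 : Int) ^ N := by
  have h1 : (1 : Nat) ≤ 2 ^ N := Nat.one_le_two_pow
  have hm : ((1 : Int) <<< N) - 1 = ↑(2 ^ N - 1 : Nat) := by
    rw [one_shl]; push_cast [h1]; ring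
  have hP : ((2 : Int) ^ N) = ↑(2 ^ N : Nat) := by push_cast; ring
  by_cases hX : 0 ≤ X
  · rw [← Int.toNat_of_nonneg hX, hm, PySem.Int.band_natCast,
      Nat.and_two_pow_sub_one_eq_mod, hP, ← Int.natCast_mod]
  · have hmn : (0 : Int) ≤ ↑(2 ^ N - 1 : Nat) := Int.natCast_nonneg _
    rw [hm]
    simp only [PySem.Int.band, if_neg hX, if_pos hmn, Int.toNat_natCast]
    set y : Nat := (-X - 1).toNat with hy
    have hXy : X = -(↑y : Int) - 1 := by
      have h0 : (0 : Int) ≤ -X - 1 := by omega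
      have := Int.toNat_of_nonneg h0
      omega
    set s : Nat := y % 2 ^ N with hsdef
    set t : Nat := y / 2 ^ N with htdef
    have hst : 2 ^ N * t + s = y := Nat.div_add_mod y (2 ^ N)
    have hs : s < 2 ^ N := Nat.mod_lt _ (Nat.two_pow_pos N)
    have hand : 2 ^ N - 1 &&& y = s := by
      rw [Nat.and_comm, Nat.and_two_pow_sub_one_eq_mod]
    rw [hand]
    set m' : Nat := 2 ^ N - 1 - s with hm'def
    have hm' : m' + s + 1 = 2 ^ N := by omega
    have hm'c : (m' : Int) = (2 : Int) ^ N - 1 - ↑s := by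
      have := congrArg (fun z : Nat => (z : Int)) hm'
      push_cast at this
      linarith
    have hyc : (y : Int) = (2 : Int) ^ N * ↑t + ↑s := by
      have := congrArg (fun z : Nat => (z : Int)) hst
      push_cast at this
      linarith
    have hXeq : X = ↑m' + (2 : Int) ^ N * (-(↑t : Int) - 1) := by
      rw [hXy, hyc, hm'c]; ring
    have hm'lt : (m' : Int) < (2 : Int) ^ N := by
      rw [hm'c]
      have : (0 : Int) ≤ ↑s := Int.natCast_nonneg _
      linarith
    rw [hXeq, Int.add_mul_emod_self_left,
      Int.emod_eq_of_lt (Int.natCast_nonneg _) hm'lt]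

lemma pysem_mod_two (x : Int) : PySem.Int.mod x 2 = x % 2 := by
  simp [PySem.Int.mod, Int.fmod_eq_emod]

-- the bit test in A's loops, read off the masked residue
lemma bit_cond (X : Int) (N k : Nat) (hk : k < N) :
    PySem.Int.band (X >>> k) 1 = ↑((X % (2 : Int) ^ N).toNat / 2 ^ k % 2) := by
  obtain ⟨e, he⟩ : ∃ e, N = k + 1 + e := ⟨N - k - 1, by omega⟩
  have hPpos : (0 : Int) < (2 : Int) ^ N := by positivity
  set r : Int := X % (2 : Int) ^ N with hrdef
  set q : Int := X / (2 : Int) ^ N with hqdef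
  have hXd : r + (2 : Int) ^ N * q = X := Int.emod_add_ediv X ((2 : Int) ^ N)
  have hr0 : (0 : Int) ≤ r := Int.emod_nonneg X (by positivity)
  have hP : ((2 : Int) ^ N) = (2 : Int) ^ k * (2 * (2 : Int) ^ e) := by
    rw [he]; ring
  have hXw : X = r + (2 : Int) ^ k * ((2 * (2 : Int) ^ e) * q) := by
    rw [← hXd, hP]; ring
  rw [PySem.Int.band_one, pysem_mod_two]
  have hsr : X >>> k = X / (2 : Int) ^ k := by
    rw [Int.shiftRight_eq_div_pow]
    norm_num
  rw [hsr, hXw, Int.add_mul_ediv_left _ _ (by positivity : ((2 : Int) ^ k) ≠ 0)]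
  have : (2 * (2 : Int) ^ e) * q = 2 * ((2 : Int) ^ e * q) := by ring
  rw [this, Int.add_mul_emod_self_left]
  obtain ⟨rn, hrn⟩ : ∃ rn : Nat, r = ↑rn := ⟨r.toNat, (Int.toNat_of_nonneg hr0).symm⟩
  rw [hrn, Int.toNat_natCast]
  have h2k : ((2 : Int) ^ k) = ↑(2 ^ k : Nat) := by push_cast; ring
  rw [h2k]
  norm_cast

-- A-side: the inner loop, bridged to Nat
lemma innerA (B : Int) (N : Nat) (bm : Nat) (hbm : (↑bm : Int) = B % (2 : Int) ^ N) :
    ∀ (l : List Nat), (∀ j ∈ l, j < N) → ∀ (p : Nat) (ki : Nat),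
    List.foldl (fun (prod2 : Int) (j : Nat) =>
        if PySem.Int.band (B >>> j) 1 ≠ 0 then
          PySem.Int.bxor prod2 ((1 : Int) <<< (ki + j))
        else prod2) (↑p : Int) l
    = ↑(l.foldl (fun q j => if bm.testBit j then q ^^^ 2 ^ j * 2 ^ ki else q) p) := by
  intro l
  induction l with
  | nil => intro _ p ki; simp
  | cons j l ih =>
    intro hl p ki
    have hj : j < N := hl j (by simp)
    have hbmt : (B % (2 : Int) ^ N).toNat = bm := by
      rw [← hbm, Int.toNat_natCast]
    have hcond : (PySem.Int.band (B >>> j) 1 ≠ 0) ↔ bm.testBit j = true := by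
      rw [bit_cond B N j hj, hbmt, Nat.testBit_eq_decide_div_mod_eq]
      constructor
      · intro h
        have : bm / 2 ^ j % 2 ≠ 0 := by
          intro h0
          apply h
          rw [h0]; norm_num
        simp; omega
      · intro h
        have : bm / 2 ^ j % 2 = 1 := by simpa using h
        rw [this]; norm_num
    have hupd : PySem.Int.bxor (↑p) ((1 : Int) <<< (ki + j))
        = ↑(p ^^^ 2 ^ j * 2 ^ ki) := by
      rw [one_shl, PySem.Int.bxor_natCast]
      congr 1
      rw [pow_add]
      ring_nf
    simp only [List.foldl_cons]
    by_cases hbit : bm.testBit j = true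
    · rw [if_pos (hcond.mpr hbit), if_pos hbit, hupd]
      exact ih (fun x hx => hl x (by simp [hx])) _ ki
    · rw [if_neg (fun hc => hbit (hcond.mp hc)), if_neg hbit]
      exact ih (fun x hx => hl x (by simp [hx])) p ki

-- A-side: the outer loop, bridged to Nat
lemma outerA (A B : Int) (N : Nat) (am bm : Nat)
    (ham : (↑am : Int) = A % (2 : Int) ^ N) (hbm : (↑bm : Int) = B % (2 : Int) ^ N)
    (hbmlt : bm < 2 ^ N) :
    ∀ (l : List Nat), (∀ k ∈ l, k < N) → ∀ (p : Nat),
    List.foldl (fun (prod : Int) (k : Nat) =>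
      if PySem.Int.band (A >>> k) 1 ≠ 0 then
        List.foldl (fun (prod2 : Int) (j : Nat) =>
          if PySem.Int.band (B >>> j) 1 ≠ 0 then
            PySem.Int.bxor prod2 ((1 : Int) <<< (k + j))
          else prod2) prod (List.range N)
      else prod) (↑p : Int) l
    = ↑(l.foldl (fun q k => if am.testBit k then q ^^^ 2 ^ k * bm else q) p) := by
  intro l
  induction l with
  | nil => intro _ p; simp
  | cons k l ih =>
    intro hl p
    have hk : k < N := hl k (by simp)
    have hamt : (A % (2 : Int) ^ N).toNat = am := by
      rw [← ham, Int.toNat_natCast]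
    have hcond : (PySem.Int.band (A >>> k) 1 ≠ 0) ↔ am.testBit k = true := by
      rw [bit_cond A N k hk, hamt, Nat.testBit_eq_decide_div_mod_eq]
      constructor
      · intro h
        simp
        have : am / 2 ^ k % 2 ≠ 0 := by
          intro h0
          apply h
          rw [h0]; norm_num
        omega
      · intro h
        have : am / 2 ^ k % 2 = 1 := by simpa using h
        rw [this]; norm_num
    have hinner : ∀ p' : Nat,
        List.foldl (fun (prod2 : Int) (j : Nat) =>
          if PySem.Int.band (B >>> j) 1 ≠ 0 then
            PySem.Int.bxor prod2 ((1 : Int) <<< (k + j))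
          else prod2) (↑p' : Int) (List.range N)
        = ↑(p' ^^^ 2 ^ k * bm) := by
      intro p'
      rw [innerA B N bm hbm (List.range N) (fun j hj => List.mem_range.mp hj) p' k]
      have : (List.range N).foldl (fun q j => if bm.testBit j then q ^^^ 2 ^ j * 2 ^ k else q) p'
          = foldBits N bm (2 ^ k) p' := by rw [foldBits]
      rw [this, foldBits_eq_clmul N bm (2 ^ k) p' hbmlt, clmul_two_pow_right]
    simp only [List.foldl_cons]
    by_cases hbit : am.testBit k = true
    · rw [if_pos (hcond.mpr hbit), if_pos hbit, hinner p]
      exact ih (fun x hx => hl x (by simp [hx])) _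
    · rw [if_neg (fun hc => hbit (hcond.mp hc)), if_neg hbit]
      exact ih (fun x hx => hl x (by simp [hx])) p

-- ===== VERDICT (by name: the statement is the Claim_ definition above) =====
theorem carryless_mul_expected_py_spec : Claim_equal_carryless_mul_expected_py := by
  intro A B n _
  unfold Spec_carryless_mul_expected_py carryless_mul_expected_py carryless_mul_expected_py_alt
  by_cases hn : n ≤ 0
  · rw [if_pos hn]
    have hr : PySem.List.pyRange 0 n 1 = [] := by
      rw [PySem.List.pyRange_one]
      have h0 : (n - 0).toNat = 0 := by omega
      rw [h0]
      simp
    rw [hr]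
    simp
  · rw [if_neg hn]
    set N : Nat := n.toNat with hN
    have hPpos : (0 : Int) < (2 : Int) ^ N := by positivity
    set am : Nat := (A % (2 : Int) ^ N).toNat with hamdef
    set bm : Nat := (B % (2 : Int) ^ N).toNat with hbmdef
    have ham : (↑am : Int) = A % (2 : Int) ^ N :=
      Int.toNat_of_nonneg (Int.emod_nonneg A (by positivity))
    have hbm : (↑bm : Int) = B % (2 : Int) ^ N :=
      Int.toNat_of_nonneg (Int.emod_nonneg B (by positivity))
    have hbmlt : bm < 2 ^ N := by
      have h1 : (↑bm : Int) < (2 : Int) ^ N := by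
        rw [hbm]; exact Int.emod_lt_of_pos B hPpos
      have h2 : ((2 : Int) ^ N) = ↑(2 ^ N : Nat) := by push_cast; ring
      rw [h2] at h1
      exact_mod_cast h1
    -- B side
    rw [band_mask A N, band_mask B N, ← ham, ← hbm, Int.toNat_natCast]
    have hB : cmeLoop am (↑bm) 0 0 = ↑(clmul am bm) := by
      have := cmeLoop_eq am bm 0 0
      simpa using this
    rw [hB]
    -- A side
    have houter := outerA A B N am bm ham hbm hbmlt (List.range N)
      (fun k hk => List.mem_range.mp hk) 0
    have hfb : (List.range N).foldl
        (fun q k => if am.testBit k then q ^^^ 2 ^ k * bm else q) 0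
        = foldBits N am bm 0 := by rw [foldBits]
    have hamlt : am < 2 ^ N := by
      have h1 : (↑am : Int) < (2 : Int) ^ N := by
        rw [ham]; exact Int.emod_lt_of_pos A hPpos
      have h2 : ((2 : Int) ^ N) = ↑(2 ^ N : Nat) := by push_cast; ring
      rw [h2] at h1
      exact_mod_cast h1
    rw [hfb, foldBits_eq_clmul N am bm 0 hamlt, Nat.zero_xor] at houter
    rw [PySem.List.pyRange_one]
    simp only [sub_zero, List.foldl_map, zero_add, ← Nat.cast_add, Int.toNat_natCast,
      Int.shiftRight_natCast_right, Int.shiftLeft_natCast_right]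
    simpa using houter
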